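-- pv_equiv track=rewrite | github.com/JakeLehle/Network-Architecture-of-APOBEC3-Driven-Mutagenesis-in-HPV-Head-and-Neck-Cancers | scripts/NETWORK/network_utils.py | nx9_order_genes_by_community
-- ===== SOURCE A (Python) =====
-- def nx9_order_genes_by_community(comm_map, genes=None, other_label="Other"):
--     """
--     Return a community-ordered gene list.
--     - Communities ordered by size descending.
--     - Genes within each community sorted alphabetically (stable).
--     - "Other" community (if present) placed last.
--     """
--     if genes is None:
--         genes = list(comm_map.keys())
--     genes = [g for g in genes if g in comm_map]
--
--     # community -> genes
--     comm_to_genes = {}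
--     for g in genes:
--         c = comm_map.get(g, other_label)
--         comm_to_genes.setdefault(c, []).append(g)
--
--     # order communities by size (desc), but put "Other" last
--     comm_items = list(comm_to_genes.items())
--     comm_items.sort(key=lambda kv: len(kv[1]), reverse=True)
--
--     if other_label in comm_to_genes:
--         comm_items = [kv for kv in comm_items if kv[0] != other_label] + [(other_label, comm_to_genes[other_label])]
--
--     ordered = []
--     for c, glist in comm_items:
--         ordered.extend(sorted(glist))  # stable inside module
--
--     return ordered
-- ===== SOURCE B (Python) =====
-- def nx9_order_genes_by_community(comm_map, genes=None, other_label="Other"):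
--     """
--     Community-ordered gene list via one pass + one keyed sort:
--     key = (Other-last flag, -community size, community first-appearance index, gene).
--     """
--     if genes is None:
--         genes = list(comm_map.keys())
--     filtered = [g for g in genes if g in comm_map]
--
--     size = {}
--     first = {}
--     for i, g in enumerate(filtered):
--         c = comm_map[g]
--         if c not in first:
--             first[c] = i
--         size[c] = size.get(c, 0) + 1
--
--     def key(g):
--         c = comm_map[g]
--         return (1 if c == other_label else 0, -size[c], first[c], g)
--
--     return sorted(filtered, key=key)
-- ===== Notes on version B (the rewrite author's own statement) =====
-- stated objective: alternative
-- what changed: Replaces A's group-into-dict / sort-communities / move-Other / concatenate-sorted-groups pipeline by one pass that records each community's size and first-appearance index, followed by a single stable sort of the filtered gene list under the composite key (Other-last flag, -size, first-appearance index, gene).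
import Mathlib
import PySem

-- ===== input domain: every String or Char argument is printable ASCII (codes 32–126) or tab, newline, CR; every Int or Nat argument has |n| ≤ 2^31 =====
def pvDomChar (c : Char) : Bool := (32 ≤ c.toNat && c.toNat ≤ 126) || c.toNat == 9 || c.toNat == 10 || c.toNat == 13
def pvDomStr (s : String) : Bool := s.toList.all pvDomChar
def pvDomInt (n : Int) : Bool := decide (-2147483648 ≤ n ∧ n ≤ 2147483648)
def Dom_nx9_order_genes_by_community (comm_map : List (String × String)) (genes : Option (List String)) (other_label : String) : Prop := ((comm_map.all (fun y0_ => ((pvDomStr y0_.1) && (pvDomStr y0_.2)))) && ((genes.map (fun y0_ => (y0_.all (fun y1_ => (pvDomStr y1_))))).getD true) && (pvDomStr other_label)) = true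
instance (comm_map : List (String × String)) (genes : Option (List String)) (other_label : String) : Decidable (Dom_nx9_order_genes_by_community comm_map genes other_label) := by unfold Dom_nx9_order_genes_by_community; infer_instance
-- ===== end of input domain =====

-- B replaces A's group-by-community / sort-communities / move-Other / concatenate pipeline by one
-- counting pass plus a single stable sort of the filtered gene list under the composite key
-- (Other-last flag, -community size, community first-appearance index, gene); same cost class.

-- ===== PORT A =====
def nx9_order_genes_by_community (comm_map : List (String × String)) (genes : Option (List String)) (other_label : String) : List String :=
  let d : PySem.Dict String String := PySem.Dict.ofList comm_map
  let gs0 : List String := match genes with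
    | none => d.keys
    | some gs => gs
  let gs1 : List String := gs0.filter (fun g => d.contains g)
  let comm_to_genes : PySem.Dict String (List String) :=
    gs1.foldl (fun m g =>
      let c := d.getD g other_label
      m.modify c [] (fun l => l ++ [g])) PySem.Dict.empty
  let comm_items := PySem.List.sorted comm_to_genes.items (fun kv => (kv.2.length : Int)) true
  let comm_items2 :=
    if comm_to_genes.contains other_label then
      comm_items.filter (fun kv => kv.1 != other_label) ++ [(other_label, comm_to_genes.getD other_label [])]
    else comm_items
  comm_items2.foldl (fun acc kv => acc ++ PySem.List.sorted kv.2 (fun g => g) false) []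

-- ===== PORT B =====
def nx9_order_genes_by_community_alt (comm_map : List (String × String)) (genes : Option (List String)) (other_label : String) : List String :=
  let d : PySem.Dict String String := PySem.Dict.ofList comm_map
  let gs0 : List String := match genes with
    | none => d.keys
    | some gs => gs
  let filtered : List String := gs0.filter (fun g => d.contains g)
  let p : PySem.Dict String Int × PySem.Dict String Int :=
    (PySem.List.enumerate filtered 0).foldl
      (fun p ig =>
        let c := d.getD ig.2 other_label   -- comm_map[g]; the key is present thanks to the filter
        let first' := if p.2.contains c then p.2 else p.2.insert c ig.1
        (p.1.modify c 0 (fun n => n + 1), first'))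
      (PySem.Dict.empty, PySem.Dict.empty)
  PySem.List.sorted filtered
    (fun g =>
      let c := d.getD g other_label
      toLex ((if c == other_label then (1:Int) else 0),
        toLex (-(p.1.getD c 0), toLex (p.2.getD c 0, g))))
    false

-- ===== PRECONDITION & SPEC =====
def Spec_nx9_order_genes_by_community (comm_map : List (String × String)) (genes : Option (List String)) (other_label : String) (out : List String) : Prop := out = nx9_order_genes_by_community_alt comm_map genes other_label
instance (comm_map : List (String × String)) (genes : Option (List String)) (other_label : String) (out : List String) : Decidable (Spec_nx9_order_genes_by_community comm_map genes other_label out) := by unfold Spec_nx9_order_genes_by_community; infer_instance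

-- ===== CLAIM (what is proved, stated in full; the proofs are below) =====
def Claim_equal_nx9_order_genes_by_community : Prop := ∀ (comm_map : List (String × String)) (genes : Option (List String)) (other_label : String), Dom_nx9_order_genes_by_community comm_map genes other_label → Spec_nx9_order_genes_by_community comm_map genes other_label (nx9_order_genes_by_community comm_map genes other_label)

-- ===== LEMMAS AND PROOFS =====

-- Proof-side abbreviations

def pvC (d : PySem.Dict String String) (ol : String) (g : String) : String := d.getD g ol

def pvFA (d : PySem.Dict String String) (ol : String)
    (m : PySem.Dict String (List String)) (g : String) : PySem.Dict String (List String) :=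
  m.modify (d.getD g ol) [] (fun l => l ++ [g])

def pvFB (d : PySem.Dict String String) (ol : String)
    (p : PySem.Dict String Int × PySem.Dict String Int) (ig : Int × String) :
    PySem.Dict String Int × PySem.Dict String Int :=
  (p.1.modify (d.getD ig.2 ol) 0 (fun n => n + 1),
   if p.2.contains (d.getD ig.2 ol) then p.2 else p.2.insert (d.getD ig.2 ol) ig.1)

def pvGroups (d : PySem.Dict String String) (ol : String) (gs : List String) :
    PySem.Dict String (List String) :=
  gs.foldl (pvFA d ol) PySem.Dict.empty

def pvSF (d : PySem.Dict String String) (ol : String) (gs : List String) :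
    PySem.Dict String Int × PySem.Dict String Int :=
  (PySem.List.enumerate gs 0).foldl (pvFB d ol) (PySem.Dict.empty, PySem.Dict.empty)

def pvKey (d : PySem.Dict String String) (ol : String)
    (sz fi : PySem.Dict String Int) (g : String) : Lex (Int × Lex (Int × Lex (Int × String))) :=
  toLex ((if d.getD g ol == ol then (1:Int) else 0),
    toLex (-(sz.getD (d.getD g ol) 0), toLex (fi.getD (d.getD g ol) 0, g)))

def pvT (fi : PySem.Dict String Int) (ol : String) (kv : String × List String) :
    Lex (Int × Lex (Int × Int)) :=
  toLex ((if kv.1 == ol then (1:Int) else 0), toLex (-(kv.2.length : Int), fi.getD kv.1 0))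

-- insertBy recursion equations (definitional)
theorem pv_insertBy_nil {α : Type} (bef : α → α → Bool) (x : α) :
    PySem.List.insertBy bef x [] = [x] := rfl

theorem pv_insertBy_cons {α : Type} (bef : α → α → Bool) (x y : α) (ys : List α) :
    PySem.List.insertBy bef x (y :: ys) =
      if bef x y then x :: y :: ys else y :: PySem.List.insertBy bef x ys := rfl

-- Stability of the reverse sort when a secondary key is strictly increasing in the input.
theorem pv_insertBy_stable {α : Type} (key sec : α → Int) (x : α) :
    ∀ (acc : List α),
      acc.Pairwise (fun a b => key b < key a ∨ (key a = key b ∧ sec a < sec b)) →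
      (∀ a ∈ acc, sec a < sec x) →
      (PySem.List.insertBy (fun a b => decide (key b < key a)) x acc).Pairwise
        (fun a b => key b < key a ∨ (key a = key b ∧ sec a < sec b)) := by
  intro acc
  induction acc with
  | nil => intro _ _; simp [pv_insertBy_nil]
  | cons y ys ih =>
    intro hpw hsec
    rw [pv_insertBy_cons]
    rcases List.pairwise_cons.1 hpw with ⟨hy, hys⟩
    by_cases hk : key y < key x
    · simp only [hk, decide_true, if_true]
      refine List.pairwise_cons.2 ⟨?_, hpw⟩
      intro z hz
      rcases List.mem_cons.1 hz with hz | hz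
      · subst hz; exact Or.inl hk
      · rcases hy z hz with h | ⟨h, _⟩
        · exact Or.inl (lt_trans h hk)
        · exact Or.inl (h ▸ hk)
    · simp only [hk, decide_false]
      refine List.pairwise_cons.2 ⟨?_, ih hys (fun a ha => hsec a (List.mem_cons_of_mem _ ha))⟩
      intro z hz
      rcases (PySem.List.mem_insertBy _ x z ys).1 hz with hz | hz
      · subst hz
        rcases lt_or_eq_of_le (not_lt.1 hk) with h | h
        · exact Or.inl h
        · exact Or.inr ⟨h.symm, hsec y List.mem_cons_self⟩
      · exact hy z hz

theorem pv_fold_stable {α : Type} (key sec : α → Int) :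
    ∀ (xs acc : List α),
      acc.Pairwise (fun a b => key b < key a ∨ (key a = key b ∧ sec a < sec b)) →
      (∀ x ∈ xs, ∀ a ∈ acc, sec a < sec x) →
      xs.Pairwise (fun a b => sec a < sec b) →
      (xs.foldl (fun acc x => PySem.List.insertBy (fun a b => decide (key b < key a)) x acc) acc).Pairwise
        (fun a b => key b < key a ∨ (key a = key b ∧ sec a < sec b)) := by
  intro xs
  induction xs with
  | nil => intro acc h _ _; simpa using h
  | cons x xs ih =>
    intro acc hacc hcross hxs
    rcases List.pairwise_cons.1 hxs with ⟨hx, hxs'⟩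
    simp only [List.foldl_cons]
    refine ih _ (pv_insertBy_stable key sec x acc hacc (fun a ha => hcross x List.mem_cons_self a ha)) ?_ hxs'
    intro z hz a ha
    rcases (PySem.List.mem_insertBy _ x a acc).1 ha with h | h
    · subst h; exact hx z hz
    · exact hcross z (List.mem_cons_of_mem _ hz) a h

theorem pv_sorted_rev_stable {α : Type} (key sec : α → Int) (xs : List α)
    (h : xs.Pairwise (fun a b => sec a < sec b)) :
    (PySem.List.sorted xs key true).Pairwise
      (fun a b => key b < key a ∨ (key a = key b ∧ sec a < sec b)) := by
  rw [PySem.List.sorted_rev_eq_foldl_insertBy]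
  exact pv_fold_stable key sec xs [] List.Pairwise.nil (by simp) h

-- Dict lemmas on association-shaped dictionaries
theorem pv_dict_contains_iff {ν : Type} (m : PySem.Dict String ν) (c : String) :
    m.contains c = true ↔ ∃ p ∈ m.items, p.1 = c := by
  simp [PySem.Dict.contains, List.any_eq_true]

theorem pv_getD_mk_map {ν : Type} (ks : List String) (F : String → ν) (dflt : ν) (c : String)
    (hc : c ∈ ks) : (PySem.Dict.mk (ks.map (fun k => (k, F k)))).getD c dflt = F c := by
  induction ks with
  | nil => simp at hc
  | cons k ks ih =>
    by_cases hk : k = c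
    · subst hk
      simp [PySem.Dict.getD, PySem.Dict.get?]
    · rcases List.mem_cons.1 hc with h | h
      · exact absurd h.symm hk
      · have := ih h
        simpa [PySem.Dict.getD, PySem.Dict.get?, List.find?_cons, hk] using this

theorem pv_getD_mk_map_notmem {ν : Type} (ks : List String) (F : String → ν) (dflt : ν)
    (c : String) (hc : c ∉ ks) :
    (PySem.Dict.mk (ks.map (fun k => (k, F k)))).getD c dflt = dflt := by
  induction ks with
  | nil => simp [PySem.Dict.getD, PySem.Dict.get?]
  | cons k ks ih =>
    have hk : k ≠ c := fun h => hc (h ▸ List.mem_cons_self)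
    have hc' : c ∉ ks := fun h => hc (List.mem_cons_of_mem _ h)
    have := ih hc'
    simpa [PySem.Dict.getD, PySem.Dict.get?, List.find?_cons, hk] using this

theorem pv_contains_insert {ν : Type} (m : PySem.Dict String ν) (k : String) (v : ν)
    (c : String) : (m.insert k v).contains c = (m.contains c || c == k) := by
  by_cases hk : m.contains k = true
  · simp only [PySem.Dict.insert, hk, if_true]
    show (m.items.map _).any _ = _
    rw [List.any_map]
    by_cases hck : c = k
    · subst hck
      have h1 : (m.items.map (fun p => if p.1 == c then (c, v) else p)).any (fun q => q.1 == c) = true := by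
        rcases (pv_dict_contains_iff m c).1 hk with ⟨p, hp, hpc⟩
        rw [List.any_map]
        refine List.any_eq_true.2 ⟨p, hp, ?_⟩
        simp [Function.comp, hpc]
      rw [List.any_map] at h1
      rw [h1]
      simp [hk]
    · have heq : ∀ p ∈ m.items,
          ((fun q : String × ν => q.1 == c) ∘ (fun p => if p.1 == k then (k, v) else p)) p
            = (p.1 == c) := by
        intro p _
        by_cases hpk : p.1 = k
        · simp [Function.comp, hpk, Ne.symm hck]
        · simp [Function.comp, hpk]
      rw [PySem.List.any_congr_mem heq]
      simp [PySem.Dict.contains, hck]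
  · simp only [PySem.Dict.insert, hk, if_false]
    show (m.items ++ [(k, v)]).any _ = _
    rw [List.any_append]
    have h1 : ((k == c) : Bool) = (c == k) := by
      by_cases hck : c = k
      · subst hck; rfl
      · have a1 : ((k == c) : Bool) = false := beq_eq_false_iff_ne.2 (fun hh => hck hh.symm)
        have a2 : ((c == k) : Bool) = false := beq_eq_false_iff_ne.2 hck
        rw [a1, a2]
    simp [PySem.Dict.contains, List.any_cons, List.any_nil, h1]

theorem pv_mem_dedup (xs : List String) (c : String) :
    c ∈ PySem.List.dedup xs ↔ c ∈ xs := by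
  simpa [PySem.List.dedup] using PySem.Set.mem_ofList xs c

theorem pv_nodup_dedup (xs : List String) : (PySem.List.dedup xs).Nodup := by
  simpa [PySem.List.dedup] using PySem.Set.nodup_ofList xs

theorem pv_dedup_append (xs : List String) (x : String) :
    PySem.List.dedup (xs ++ [x]) =
      if x ∈ xs then PySem.List.dedup xs else PySem.List.dedup xs ++ [x] := by
  have h1 : PySem.List.dedup (xs ++ [x]) = PySem.Set.add (PySem.List.dedup xs) x := by
    simp [PySem.List.dedup, PySem.Set.ofList_eq_foldl, List.foldl_append,
      PySem.Set.ofList, PySem.Set.empty]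
  rw [h1]
  by_cases hx : x ∈ xs
  · have hmem : x ∈ PySem.List.dedup xs := (pv_mem_dedup xs x).2 hx
    have hc : PySem.Set.contains (PySem.List.dedup xs) x = true := by
      simpa [PySem.Set.contains] using hmem
    simp [PySem.Set.add, hc, hx]
  · have hmem : x ∉ PySem.List.dedup xs := fun h => hx ((pv_mem_dedup xs x).1 h)
    have hc : PySem.Set.contains (PySem.List.dedup xs) x = false := by
      simpa [PySem.Set.contains] using hmem
    simp [PySem.Set.add, hc, hx]

-- sum over a nodup list with a single possibly nonzero entry
theorem pv_sum_single (x : String) (m : Nat) :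
    ∀ ks : List String, ks.Nodup →
      (ks.map (fun c => if x = c then m else 0)).sum = if x ∈ ks then m else 0 := by
  intro ks
  induction ks with
  | nil => simp
  | cons k ks ih =>
    intro hnd
    rcases List.nodup_cons.1 hnd with ⟨hk, hnd'⟩
    by_cases hx : x = k
    · subst hx
      simp [List.map_cons, ih hnd', hk]
    · rw [List.map_cons, List.sum_cons, if_neg hx, ih hnd', Nat.zero_add]
      by_cases hxs : x ∈ ks <;> simp [List.mem_cons, hx, hxs]

-- the classes of a classifier, flattened, are a permutation of the list
theorem pv_classes_perm (C : String → String) (gs : List String) :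
    ((PySem.List.dedup (gs.map C)).flatMap (fun c => gs.filter (fun g => C g == c))).Perm gs := by
  rw [List.perm_iff_count]
  intro a
  rw [List.flatMap_def, List.count_flatten, List.map_map]
  have hmapeq : (PySem.List.dedup (gs.map C)).map (List.count a ∘ fun c => gs.filter (fun g => C g == c))
      = (PySem.List.dedup (gs.map C)).map (fun c => if C a = c then List.count a gs else 0) := by
    apply List.map_congr_left
    intro c _
    show List.count a (gs.filter (fun g => C g == c)) = _
    by_cases hc : C a = c
    · rw [if_pos hc]
      exact List.count_filter (by simp [hc])
    · rw [if_neg hc, List.count_eq_zero]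
      intro hmem
      rcases List.mem_filter.1 hmem with ⟨_, h2⟩
      exact hc (by simpa using h2)
  rw [hmapeq, pv_sum_single _ _ _ (pv_nodup_dedup _)]
  by_cases ha : a ∈ gs
  · rw [if_pos ((pv_mem_dedup _ _).2 (List.mem_map_of_mem ha))]
  · rw [List.count_eq_zero.2 ha]
    split <;> rfl

-- unique association entry extraction
theorem pv_filter_eq_single {ν : Type} (k : String) (v : ν) :
    ∀ (l : List (String × ν)), (l.map Prod.fst).Nodup → (k, v) ∈ l →
      l.filter (fun kv => kv.1 == k) = [(k, v)] := by
  intro l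
  induction l with
  | nil => intro _ h; simp at h
  | cons p l ih =>
    intro hnd hmem
    rw [List.map_cons] at hnd
    rcases List.nodup_cons.1 hnd with ⟨hp, hnd'⟩
    rcases List.mem_cons.1 hmem with h | h
    · subst h
      simp only [List.filter_cons, BEq.rfl, if_true]
      have : l.filter (fun kv => kv.1 == k) = [] := by
        rw [List.filter_eq_nil_iff]
        intro kv hkv
        simp only [beq_iff_eq]
        intro hkvk
        exact hp (by simpa [hkvk] using List.mem_map_of_mem (f := Prod.fst) hkv)
      simp [this]
    · have hpk : (p.1 == k) = false := by
        simp only [beq_eq_false_iff_ne]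
        intro hpk
        exact hp (by simpa [hpk] using List.mem_map_of_mem (f := Prod.fst) h)
      simp only [List.filter_cons, hpk]
      exact ih hnd' h

-- lexicographic helpers
theorem pv_lt_ext (o1 o2 s1 s2 f1 f2 : Int) (x y : String)
    (h : (toLex (o1, toLex (s1, f1)) : Lex (Int × Lex (Int × Int))) < toLex (o2, toLex (s2, f2))) :
    (toLex (o1, toLex (s1, toLex (f1, x))) : Lex (Int × Lex (Int × Lex (Int × String))))
      < toLex (o2, toLex (s2, toLex (f2, y))) := by
  rcases Prod.Lex.toLex_lt_toLex.1 h with h1 | ⟨h1, h2⟩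
  · exact Prod.Lex.toLex_lt_toLex.2 (Or.inl h1)
  · rcases Prod.Lex.toLex_lt_toLex.1 h2 with h3 | ⟨h3, h4⟩
    · exact Prod.Lex.toLex_lt_toLex.2 (Or.inr ⟨h1, Prod.Lex.toLex_lt_toLex.2 (Or.inl h3)⟩)
    · exact Prod.Lex.toLex_lt_toLex.2 (Or.inr ⟨h1, Prod.Lex.toLex_lt_toLex.2
        (Or.inr ⟨h3, Prod.Lex.toLex_lt_toLex.2 (Or.inl h4)⟩)⟩)

theorem pv_le_ext (o s f : Int) (x y : String) (h : x ≤ y) :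
    (toLex (o, toLex (s, toLex (f, x))) : Lex (Int × Lex (Int × Lex (Int × String))))
      ≤ toLex (o, toLex (s, toLex (f, y))) :=
  Prod.Lex.toLex_le_toLex.2 (Or.inr ⟨rfl, Prod.Lex.toLex_le_toLex.2
    (Or.inr ⟨rfl, Prod.Lex.toLex_le_toLex.2 (Or.inr ⟨rfl, h⟩)⟩)⟩)

-- ===== the build invariant =====
theorem pv_build_spec (d : PySem.Dict String String) (ol : String) (gs : List String) :
    (pvGroups d ol gs).items
        = (PySem.List.dedup (gs.map (pvC d ol))).map
            (fun c => (c, gs.filter (fun g => pvC d ol g == c)))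
  ∧ (∀ c, (pvSF d ol gs).1.getD c 0 = ((gs.filter (fun g => pvC d ol g == c)).length : Int))
  ∧ (∀ c, ((pvSF d ol gs).2.contains c = true ↔ c ∈ gs.map (pvC d ol)))
  ∧ (∀ c, (pvSF d ol gs).2.contains c = true → (pvSF d ol gs).2.getD c 0 < (gs.length : Int))
  ∧ (pvGroups d ol gs).items.Pairwise
      (fun a b => (pvSF d ol gs).2.getD a.1 0 < (pvSF d ol gs).2.getD b.1 0) := by
  induction gs using List.reverseRecOn with
  | nil =>
    refine ⟨?_, ?_, ?_, ?_, ?_⟩ <;>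
      simp [pvGroups, pvSF, PySem.Dict.empty, PySem.Dict.getD, PySem.Dict.get?,
        PySem.Dict.contains, PySem.List.dedup, PySem.Set.ofList_eq_foldl,
        PySem.Set.empty, PySem.List.enumerate_nil]
  | append_singleton gs g ih =>
    obtain ⟨hG, hS, hF1, hF2, hP⟩ := ih
    have hstepA : pvGroups d ol (gs ++ [g]) =
        (pvGroups d ol gs).insert (pvC d ol g)
          ((pvGroups d ol gs).getD (pvC d ol g) [] ++ [g]) := by
      simp [pvGroups, pvFA, PySem.Dict.modify, List.foldl_append, pvC]
    have hstepB : pvSF d ol (gs ++ [g]) =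
        ((pvSF d ol gs).1.insert (pvC d ol g) ((pvSF d ol gs).1.getD (pvC d ol g) 0 + 1),
         if (pvSF d ol gs).2.contains (pvC d ol g) then (pvSF d ol gs).2
         else (pvSF d ol gs).2.insert (pvC d ol g) ((0 : Int) + gs.length)) := by
      simp [pvSF, pvFB, PySem.List.enumerate_append, PySem.List.enumerate_cons,
        PySem.List.enumerate_nil, List.foldl_append, PySem.Dict.modify, pvC]
    set C : String → String := pvC d ol with hC
    set c0 : String := C g with hc0
    set m : PySem.Dict String (List String) := pvGroups d ol gs with hmdef
    set sz : PySem.Dict String Int := (pvSF d ol gs).1 with hszdef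
    set fi : PySem.Dict String Int := (pvSF d ol gs).2 with hfidef
    set ded : List String := PySem.List.dedup (gs.map C) with hdeddef
    have hmk : m = PySem.Dict.mk (ded.map (fun c => (c, gs.filter (fun g' => C g' == c)))) := by
      apply PySem.Dict.ext
      simpa using hG
    have hCont : m.contains c0 = true ↔ c0 ∈ ded := by
      rw [pv_dict_contains_iff]
      constructor
      · rintro ⟨p, hp, hpc⟩
        rw [hG] at hp
        rcases List.mem_map.1 hp with ⟨c, hcded, rfl⟩
        exact hpc ▸ hcded
      · intro h
        exact ⟨(c0, gs.filter (fun g' => C g' == c0)), by rw [hG]; exact List.mem_map_of_mem h, rfl⟩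
    have hfa : ∀ c : String, (gs ++ [g]).filter (fun g' => C g' == c)
        = gs.filter (fun g' => C g' == c) ++ (if c0 = c then [g] else []) := by
      intro c
      rw [List.filter_append]
      congr 1
      by_cases h : c0 = c
      · rw [if_pos h]
        have hb : ((C g == c) : Bool) = true := beq_iff_eq.2 (hc0 ▸ h)
        simp [List.filter_cons, hb]
      · rw [if_neg h]
        have hb : ((C g == c) : Bool) = false := beq_eq_false_iff_ne.2 (hc0 ▸ h)
        simp [List.filter_cons, hb]
    have hmapC : (gs ++ [g]).map C = gs.map C ++ [c0] := by simp [← hc0]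
    -- (S) is independent of the case split
    have hSnew : ∀ c, (pvSF d ol (gs ++ [g])).1.getD c 0
        = (((gs ++ [g]).filter (fun g' => C g' == c)).length : Int) := by
      intro c
      rw [hstepB]
      show (sz.insert c0 (sz.getD c0 0 + 1)).getD c 0 = _
      rw [PySem.Dict.getD_insert, hfa c]
      by_cases h : c = c0
      · subst h
        rw [if_pos rfl, if_pos rfl, hS]
        push_cast
        simp
      · rw [if_neg h, if_neg (fun hh => h hh.symm), hS]
        simp
    by_cases hmem : c0 ∈ gs.map C
    · -- c0 already has a community entry
      have hded' : PySem.List.dedup ((gs ++ [g]).map C) = ded := by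
        rw [hmapC, pv_dedup_append, if_pos hmem, hdeddef]
      have hc : m.contains c0 = true := hCont.2 ((pv_mem_dedup _ _).2 hmem)
      have hgd : m.getD c0 [] = gs.filter (fun g' => C g' == c0) := by
        rw [hmk]
        exact pv_getD_mk_map _ _ _ _ ((pv_mem_dedup _ _).2 hmem)
      have hfic : fi.contains c0 = true := (hF1 c0).2 hmem
      have hGnew : (pvGroups d ol (gs ++ [g])).items
          = ded.map (fun c => (c, (gs ++ [g]).filter (fun g' => C g' == c))) := by
        rw [hstepA]
        show ((m.insert c0 (m.getD c0 [] ++ [g]))).items = _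
        simp only [PySem.Dict.insert, hc, if_true]
        rw [hG, List.map_map]
        apply List.map_congr_left
        intro c hcded
        by_cases h : c = c0
        · subst h
          simp only [Function.comp_apply]
          rw [hfa]
          simp [hgd]
        · simp only [Function.comp_apply]
          rw [hfa c]
          have hb : ((c == c0) : Bool) = false := beq_eq_false_iff_ne.2 h
          have h2 : ¬ (c0 = c) := fun hh => h hh.symm
          simp [hb, h2]
      refine ⟨?_, hSnew, ?_, ?_, ?_⟩
      · rw [hded']
        exact hGnew
      · intro c
        rw [hstepB]
        show (if fi.contains c0 = true then fi else _).contains c = true ↔ _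
        rw [if_pos hfic, hmapC]
        constructor
        · intro h
          exact List.mem_append.2 (Or.inl ((hF1 c).1 h))
        · intro h
          rcases List.mem_append.1 h with h | h
          · exact (hF1 c).2 h
          · have : c = c0 := by simpa using h
            exact this ▸ hfic
      · intro c h
        rw [hstepB] at h ⊢
        rw [show ((sz.insert c0 (sz.getD c0 0 + 1),
              if fi.contains c0 = true then fi else fi.insert c0 ((0:Int) + gs.length)).2)
            = fi from by rw [if_pos hfic]] at h ⊢
        have := hF2 c h
        have hlen : ((gs ++ [g]).length : Int) = (gs.length : Int) + 1 := by simp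
        rw [hlen]
        omega
      · rw [hstepB, hGnew]
        show (ded.map (fun c => (c, (gs ++ [g]).filter (fun g' => C g' == c)))).Pairwise
          (fun (a b : String × List String) =>
            (if fi.contains c0 = true then fi
              else fi.insert c0 ((0:Int) + gs.length)).getD a.1 0 <
            (if fi.contains c0 = true then fi
              else fi.insert c0 ((0:Int) + gs.length)).getD b.1 0)
        rw [if_pos hfic, List.pairwise_map]
        have h' := hP
        rw [hG, List.pairwise_map] at h'
        exact h'
    · -- c0 is a new community
      have hded'' : PySem.List.dedup ((gs ++ [g]).map C) = ded ++ [c0] := by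
        rw [hmapC, pv_dedup_append, if_neg hmem, hdeddef]
      have hc : m.contains c0 = false := by
        cases h : m.contains c0
        · rfl
        · exact absurd ((pv_mem_dedup _ _).1 (hCont.1 h)) hmem
      have hfic : fi.contains c0 = false := by
        cases h : fi.contains c0
        · rfl
        · exact absurd ((hF1 c0).1 h) hmem
      have hgd : m.getD c0 [] = [] := by
        rw [hmk]
        exact pv_getD_mk_map_notmem _ _ _ _ (fun h => hmem ((pv_mem_dedup _ _).1 h))
      have hfilter0 : gs.filter (fun g' => C g' == c0) = [] := by
        rw [List.filter_eq_nil_iff]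
        intro a ha h
        exact hmem ((beq_iff_eq.1 h) ▸ List.mem_map_of_mem ha)
      have hGnew : (pvGroups d ol (gs ++ [g])).items
          = (ded ++ [c0]).map (fun c => (c, (gs ++ [g]).filter (fun g' => C g' == c))) := by
        rw [hstepA]
        show ((m.insert c0 (m.getD c0 [] ++ [g]))).items = _
        simp only [PySem.Dict.insert, hc, Bool.false_eq_true, if_false]
        rw [hG, List.map_append, hgd]
        congr 1
        · apply List.map_congr_left
          intro c hcded
          have hne : c ≠ c0 := fun h => hmem ((pv_mem_dedup _ _).1 (h ▸ hcded))
          rw [hfa c, if_neg (fun hh => hne hh.symm)]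
          simp
        · rw [List.map_singleton, hfa c0, if_pos rfl, hfilter0]
      refine ⟨?_, hSnew, ?_, ?_, ?_⟩
      · rw [hded'']
        exact hGnew
      · intro c
        rw [hstepB]
        show (if fi.contains c0 = true then fi
              else fi.insert c0 ((0:Int) + gs.length)).contains c = true ↔ _
        rw [if_neg (by simp [hfic]), pv_contains_insert, hmapC]
        constructor
        · intro h
          rcases Bool.or_eq_true_iff.1 h with h | h
          · exact List.mem_append.2 (Or.inl ((hF1 c).1 h))
          · exact List.mem_append.2 (Or.inr (by simpa using beq_iff_eq.1 h))
        · intro h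
          rcases List.mem_append.1 h with h | h
          · exact Bool.or_eq_true_iff.2 (Or.inl ((hF1 c).2 h))
          · exact Bool.or_eq_true_iff.2 (Or.inr (by simpa using h))
      · intro c h
        rw [hstepB] at h ⊢
        rw [show ((sz.insert c0 (sz.getD c0 0 + 1),
              if fi.contains c0 = true then fi else fi.insert c0 ((0:Int) + gs.length)).2)
            = fi.insert c0 ((0:Int) + gs.length) from by rw [if_neg (by simp [hfic])]] at h ⊢
        have hlen : ((gs ++ [g]).length : Int) = (gs.length : Int) + 1 := by simp
        rw [PySem.Dict.getD_insert, hlen]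
        by_cases hcc : c = c0
        · rw [if_pos hcc]
          omega
        · rw [if_neg hcc]
          rw [pv_contains_insert] at h
          rcases Bool.or_eq_true_iff.1 h with h | h
          · have := hF2 c h
            omega
          · exact absurd (beq_iff_eq.1 h) hcc
      · rw [hstepB, hGnew]
        show (((ded ++ [c0]).map (fun c => (c, (gs ++ [g]).filter (fun g' => C g' == c))))).Pairwise
          (fun (a b : String × List String) =>
            (if fi.contains c0 = true then fi else fi.insert c0 ((0:Int) + gs.length)).getD a.1 0 <
            (if fi.contains c0 = true then fi else fi.insert c0 ((0:Int) + gs.length)).getD b.1 0)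
        rw [if_neg (by simp [hfic]), List.pairwise_map, List.pairwise_append]
        have hPded : ded.Pairwise (fun a b => fi.getD a 0 < fi.getD b 0) := by
          have h' := hP
          rw [hG, List.pairwise_map] at h'
          exact h'
        have hne : ∀ a ∈ ded, a ≠ c0 := fun a ha h =>
          hmem ((pv_mem_dedup _ _).1 (h ▸ ha))
        refine ⟨?_, by simp, ?_⟩
        · refine hPded.imp_of_mem ?_
          intro a b ha hb hab
          rw [PySem.Dict.getD_insert, PySem.Dict.getD_insert,
            if_neg (hne a ha), if_neg (hne b hb)]
          exact hab
        · intro a ha b hb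
          have hb' : b = c0 := by simpa using hb
          subst hb'
          show (fi.insert c0 ((0:Int) + gs.length)).getD a 0
            < (fi.insert c0 ((0:Int) + gs.length)).getD c0 0
          rw [PySem.Dict.getD_insert, PySem.Dict.getD_insert, if_neg (hne a ha), if_pos rfl]
          have hconta : fi.contains a = true := (hF1 a).2 ((pv_mem_dedup _ _).1 ha)
          have := hF2 a hconta
          omega

-- ===== main equivalence on the shared pipeline =====
theorem pv_main (d : PySem.Dict String String) (ol : String) (gs : List String) :
    (if (pvGroups d ol gs).contains ol then
        (PySem.List.sorted (pvGroups d ol gs).items (fun kv => (kv.2.length : Int)) true).filter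
            (fun kv => kv.1 != ol)
          ++ [(ol, (pvGroups d ol gs).getD ol [])]
      else PySem.List.sorted (pvGroups d ol gs).items (fun kv => (kv.2.length : Int)) true).foldl
        (fun acc kv => acc ++ PySem.List.sorted kv.2 (fun g => g) false) []
    = PySem.List.sorted gs (pvKey d ol (pvSF d ol gs).1 (pvSF d ol gs).2) false := by
  obtain ⟨hG, hS, hF1, hF2, hP⟩ := pv_build_spec d ol gs
  set C : String → String := pvC d ol with hC
  set m : PySem.Dict String (List String) := pvGroups d ol gs with hmdef
  set sz : PySem.Dict String Int := (pvSF d ol gs).1 with hszdef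
  set fi : PySem.Dict String Int := (pvSF d ol gs).2 with hfidef
  set ded : List String := PySem.List.dedup (gs.map C) with hdeddef
  set K : String → Lex (Int × Lex (Int × Lex (Int × String))) := pvKey d ol sz fi with hKdef
  set ci : List (String × List String) :=
    PySem.List.sorted m.items (fun kv => (kv.2.length : Int)) true with hcidef
  have hmk : m = PySem.Dict.mk (ded.map (fun c => (c, gs.filter (fun g' => C g' == c)))) := by
    apply PySem.Dict.ext
    simpa using hG
  have hentry : ∀ kv ∈ m.items, kv.2 = gs.filter (fun g' => C g' == kv.1) := by
    intro kv hkv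
    rw [hG] at hkv
    rcases List.mem_map.1 hkv with ⟨c, _, rfl⟩
    rfl
  have hkeymem : ∀ kv ∈ m.items, kv.1 ∈ ded := by
    intro kv hkv
    rw [hG] at hkv
    rcases List.mem_map.1 hkv with ⟨c, hc, rfl⟩
    exact hc
  have hkeys : (m.items.map Prod.fst).Nodup := by
    rw [hG, List.map_map]
    have : (Prod.fst ∘ fun c => (c, gs.filter (fun g' => C g' == c))) = id := by
      funext c; rfl
    rw [this, List.map_id, hdeddef]
    exact pv_nodup_dedup _
  have hCmem : ∀ kv ∈ m.items, ∀ x ∈ kv.2, C x = kv.1 := by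
    intro kv hkv x hx
    rw [hentry kv hkv] at hx
    exact (beq_iff_eq).1 (List.mem_filter.1 hx).2
  have hszlen : ∀ kv ∈ m.items, sz.getD kv.1 0 = (kv.2.length : Int) := by
    intro kv hkv
    rw [hS kv.1, hentry kv hkv]
  have hKx : ∀ kv ∈ m.items, ∀ x ∈ kv.2,
      K x = toLex ((if kv.1 == ol then (1:Int) else 0),
        toLex (-(kv.2.length : Int), toLex (fi.getD kv.1 0, x))) := by
    intro kv hkv x hx
    have hc : d.getD x ol = kv.1 := hCmem kv hkv x hx
    show pvKey d ol sz fi x = _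
    rw [pvKey, hc, hszlen kv hkv]
  have hciperm : ci.Perm m.items := PySem.List.sorted_perm _ _ _
  have hstab : ci.Pairwise (fun a b => (b.2.length : Int) < (a.2.length : Int) ∨
      ((a.2.length : Int) = (b.2.length : Int) ∧ fi.getD a.1 0 < fi.getD b.1 0)) :=
    pv_sorted_rev_stable (fun kv => (kv.2.length : Int)) (fun kv => fi.getD kv.1 0) m.items hP
  have hT1 : ∀ a b : String × List String, a.1 ≠ ol → b.1 ≠ ol →
      ((b.2.length : Int) < (a.2.length : Int) ∨
        ((a.2.length : Int) = (b.2.length : Int) ∧ fi.getD a.1 0 < fi.getD b.1 0)) →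
      pvT fi ol a < pvT fi ol b := by
    intro a b ha hb h
    rw [pvT, pvT, if_neg (by simpa using ha), if_neg (by simpa using hb)]
    apply Prod.Lex.toLex_lt_toLex.2
    refine Or.inr ⟨rfl, Prod.Lex.toLex_lt_toLex.2 ?_⟩
    rcases h with h | ⟨h1, h2⟩
    · exact Or.inl (by omega)
    · exact Or.inr ⟨by omega, h2⟩
  -- the rearranged community list, uniformly in the two branches
  suffices hsuff : ∀ ci2 : List (String × List String),
      ci2.Perm m.items →
      ci2.Pairwise (fun a b => pvT fi ol a < pvT fi ol b) →
      ci2.foldl (fun acc kv => acc ++ PySem.List.sorted kv.2 (fun g => g) false) []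
        = PySem.List.sorted gs K false by
    by_cases hco : m.contains ol = true
    · rw [if_pos hco]
      have holmem : ol ∈ ded := by
        rcases (pv_dict_contains_iff m ol).1 hco with ⟨p, hp, hpc⟩
        rw [hG] at hp
        rcases List.mem_map.1 hp with ⟨c, hcded, rfl⟩
        exact hpc ▸ hcded
      have hgd : m.getD ol [] = gs.filter (fun g' => C g' == ol) := by
        rw [hmk]
        exact pv_getD_mk_map _ _ _ _ holmem
      have he : (ol, gs.filter (fun g' => C g' == ol)) ∈ m.items := by
        rw [hG]
        exact List.mem_map_of_mem holmem
      have he_ci : (ol, gs.filter (fun g' => C g' == ol)) ∈ ci := hciperm.mem_iff.2 he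
      have hkeysci : (ci.map Prod.fst).Nodup :=
        (hciperm.map Prod.fst).symm.nodup hkeys
      have hfiltone : ci.filter (fun kv => kv.1 == ol) = [(ol, gs.filter (fun g' => C g' == ol))] :=
        pv_filter_eq_single ol _ ci hkeysci he_ci
      have hnotnot : (fun kv : String × List String => !(kv.1 != ol)) = fun kv => kv.1 == ol := by
        funext kv
        simp [bne]
      have hperm2 : (ci.filter (fun kv => kv.1 != ol) ++ [(ol, m.getD ol [])]).Perm m.items := by
        rw [hgd]
        have h1 := List.filter_append_perm (fun kv => kv.1 != ol) ci
        rw [hnotnot, hfiltone] at h1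
        exact h1.trans hciperm
      refine hsuff _ hperm2 ?_
      rw [List.pairwise_append]
      have hmemf : ∀ kv ∈ ci.filter (fun kv => kv.1 != ol), kv.1 ≠ ol := by
        intro kv hkv
        have := (List.mem_filter.1 hkv).2
        simpa using this
      refine ⟨?_, by simp, ?_⟩
      · refine (hstab.filter _).imp_of_mem ?_
        intro a b ha hb hab
        exact hT1 a b (hmemf a ha) (hmemf b hb) hab
      · intro a ha b hb
        have hb' : b = (ol, m.getD ol []) := by simpa using hb
        subst hb'
        rw [pvT, pvT, if_neg (by simpa using hmemf a ha), if_pos (by simp)]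
        exact Prod.Lex.toLex_lt_toLex.2 (Or.inl (by omega))
    · rw [if_neg hco]
      have hnot : ∀ kv ∈ ci, kv.1 ≠ ol := by
        intro kv hkv h
        apply hco
        refine (pv_dict_contains_iff m ol).2 ⟨kv, hciperm.mem_iff.1 hkv, h⟩
      refine hsuff _ hciperm ?_
      refine hstab.imp_of_mem ?_
      intro a b ha hb hab
      exact hT1 a b (hnot a ha) (hnot b hb) hab
  -- proof of the sufficient statement
  intro ci2 hperm2 hpwT
  have hmem2 : ∀ kv ∈ ci2, kv ∈ m.items := fun kv hkv => hperm2.mem_iff.1 hkv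
  rw [PySem.List.foldl_append_eq_flatMap]
  rw [List.nil_append]
  -- permutation
  have hApg : (ci2.flatMap (fun kv => PySem.List.sorted kv.2 (fun g => g) false)).Perm gs := by
    have h1 : (ci2.flatMap (fun kv => PySem.List.sorted kv.2 (fun g => g) false)).Perm
        (m.items.flatMap (fun kv => kv.2)) :=
      List.Perm.flatMap hperm2 (fun a _ => PySem.List.sorted_perm _ _ _)
    have h2 : m.items.flatMap (fun kv => kv.2)
        = ded.flatMap (fun c => gs.filter (fun g' => C g' == c)) := by
      rw [hG, List.flatMap_map]
    refine h1.trans ?_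
    rw [h2, hdeddef]
    exact pv_classes_perm C gs
  -- ordering
  have hApw : (ci2.flatMap (fun kv => PySem.List.sorted kv.2 (fun g => g) false)).Pairwise
      (fun a b => K a ≤ K b) := by
    rw [List.flatMap_def, List.pairwise_flatten]
    constructor
    · intro l hl
      rcases List.mem_map.1 hl with ⟨kv, hkv, rfl⟩
      have hin := PySem.List.sorted_pairwise kv.2 (fun g => g)
      refine hin.imp_of_mem ?_
      intro x y hx hy hxy
      have hx' : x ∈ kv.2 := (PySem.List.mem_sorted _ _ _ _).1 hx
      have hy' : y ∈ kv.2 := (PySem.List.mem_sorted _ _ _ _).1 hy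
      rw [hKx kv (hmem2 kv hkv) x hx', hKx kv (hmem2 kv hkv) y hy']
      exact pv_le_ext _ _ _ x y hxy
    · rw [List.pairwise_map]
      refine hpwT.imp_of_mem ?_
      intro a b ha hb hab x hx y hy
      have hx' : x ∈ a.2 := (PySem.List.mem_sorted _ _ _ _).1 hx
      have hy' : y ∈ b.2 := (PySem.List.mem_sorted _ _ _ _).1 hy
      rw [hKx a (hmem2 a ha) x hx', hKx b (hmem2 b hb) y hy']
      rw [pvT, pvT] at hab
      exact le_of_lt (pv_lt_ext _ _ _ _ _ _ x y hab)
  -- B side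
  have hBpg : (PySem.List.sorted gs K false).Perm gs := PySem.List.sorted_perm _ _ _
  have hBpw : (PySem.List.sorted gs K false).Pairwise (fun a b => K a ≤ K b) :=
    PySem.List.sorted_pairwise gs K
  have hKinj : Function.Injective K := by
    intro a b h
    have := congrArg
      (fun p : Lex (Int × Lex (Int × Lex (Int × String))) => (ofLex ((ofLex ((ofLex p).2)).2)).2) h
    simpa [hKdef, pvKey] using this
  exact PySem.List.eq_of_perm_of_pairwise_le_of_injective K hKinj
    (hApg.trans hBpg.symm) hApw hBpw

-- ===== VERDICT (by name: the statement is the Claim_ definition above) =====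
theorem nx9_order_genes_by_community_spec : Claim_equal_nx9_order_genes_by_community := by
  intro comm_map genes other_label _
  show _ = _
  exact pv_main (PySem.Dict.ofList comm_map) other_label
    ((match genes with
      | none => (PySem.Dict.ofList comm_map).keys
      | some gs => gs).filter (fun g => (PySem.Dict.ofList comm_map).contains g))
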